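-- pv_equiv track=rewrite | github.com/markxxi/Retrievision-2 | app/src/main/python/colorIdentifier.py | identify_parent_color
-- ===== SOURCE A (Python) =====
-- def identify_parent_color(cname):
--     distinctive_colors = {
--         'white': ['white', 'snow', 'seashell', 'antiquewhite', 'floralwhite', 'ivory', 'honeydew',
--                   'mintcream', 'azure', 'aliceblue', 'ghostwhite', 'lavenderblush'],
--         'gray': ['dimgray', 'dimgrey', 'gray', 'grey', 'darkgray', 'darkgrey', 'silver',
--                  'lightgray', 'lightgrey', 'gainsboro', 'whitesmoke'],
--         'red': ['orangered', 'coral', 'darksalmon', 'tomato', 'salmon', 'mistyrose', 'red',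
--                 'darkred', 'maroon', 'firebrick', 'indianred', 'lightcoral'],
--         'brown': ['linen', 'peru', 'peachpuff', 'sandybrown', 'saddlebrown', 'chocolate', 'sienna',
--                   'brown', 'tan', 'burlywood', 'bisque'],
--         'orange': ['moccasin', 'papayawhip', 'blanchedalmond', 'navajowhite', 'darkorange'],
--         'yellow': ['lightgoldenrodyellow', 'lightyellow', 'beige', 'ivory', 'darkkhaki',
--                    'palegoldenrod', 'khaki', 'lemonchiffon', 'gold', 'cornsilk', 'goldenrod',
--                    'darkgoldenrod', 'floralwhite', 'oldlace'],
--         'green': ['aquamarine', 'mediumaquamarine', 'mediumspringgreen', 'mintcream', 'springgreen',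
--                   'mediumseagreen', 'lime', 'green', 'darkgreen', 'limegreen', 'forestgreen',
--                   'lightgreen', 'palegreen', 'darkseagreen', 'honeydew', 'lawngreen', 'chartreuse',
--                   'greenyellow', 'darkolivegreen', 'yellowgreen', 'olivedrab'],
--         'blue': ['blue', 'mediumblue', 'darkblue', 'navy', 'midnightblue', 'lavender', 'ghostwhite',
--                  'royalblue', 'cornflowerblue', 'lightsteelblue', 'slategrey', 'slategray',
--                  'lightslategray', 'lightslategrey', 'dodgerblue', 'aliceblue', 'steelblue',
--                  'lightskyblue', 'skyblue', 'deepskyblue', 'lightblue', 'powderblue', 'cadetblue',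
--                  'darkturquoise', 'cyan', 'aqua', 'darkcyan', 'teal', 'darkslategray',
--                  'darkslategrey', 'paleturquoise', 'lightcyan', 'azure', 'mediumturquoise',
--                  'lightseagreen', 'turquoise'],
--         'violet': ['darkmagenta', 'purple', 'violet', 'plum', 'thistle', 'mediumorchid',
--                    'darkviolet', 'darkorchid', 'indigo', 'blueviolet', 'rebeccapurple',
--                    'mediumpurple', 'mediumslateblue', 'darkslateblue', 'slateblue'],
--         'pink': ['fuchsia', 'magenta', 'orchid', 'mediumvioletred', 'deeppink', 'hotpink',
--                  'lavenderblush', 'palevioletred', 'crimson', 'pink', 'lightpink'],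
--         'black': ['black']
--     }
--
--     cname = cname.lower()
--
--     for parent_color, color_list in distinctive_colors.items():
--         if cname in color_list:
--             return parent_color
--
--     return "Undefined"
-- ===== SOURCE B (Python) =====
-- _PARENT = {
--     'white': 'white',
--     'snow': 'white',
--     'seashell': 'white',
--     'antiquewhite': 'white',
--     'floralwhite': 'white',
--     'ivory': 'white',
--     'honeydew': 'white',
--     'mintcream': 'white',
--     'azure': 'white',
--     'aliceblue': 'white',
--     'ghostwhite': 'white',
--     'lavenderblush': 'white',
--     'dimgray': 'gray',
--     'dimgrey': 'gray',
--     'gray': 'gray',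
--     'grey': 'gray',
--     'darkgray': 'gray',
--     'darkgrey': 'gray',
--     'silver': 'gray',
--     'lightgray': 'gray',
--     'lightgrey': 'gray',
--     'gainsboro': 'gray',
--     'whitesmoke': 'gray',
--     'orangered': 'red',
--     'coral': 'red',
--     'darksalmon': 'red',
--     'tomato': 'red',
--     'salmon': 'red',
--     'mistyrose': 'red',
--     'red': 'red',
--     'darkred': 'red',
--     'maroon': 'red',
--     'firebrick': 'red',
--     'indianred': 'red',
--     'lightcoral': 'red',
--     'linen': 'brown',
--     'peru': 'brown',
--     'peachpuff': 'brown',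
--     'sandybrown': 'brown',
--     'saddlebrown': 'brown',
--     'chocolate': 'brown',
--     'sienna': 'brown',
--     'brown': 'brown',
--     'tan': 'brown',
--     'burlywood': 'brown',
--     'bisque': 'brown',
--     'moccasin': 'orange',
--     'papayawhip': 'orange',
--     'blanchedalmond': 'orange',
--     'navajowhite': 'orange',
--     'darkorange': 'orange',
--     'lightgoldenrodyellow': 'yellow',
--     'lightyellow': 'yellow',
--     'beige': 'yellow',
--     'darkkhaki': 'yellow',
--     'palegoldenrod': 'yellow',
--     'khaki': 'yellow',
--     'lemonchiffon': 'yellow',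
--     'gold': 'yellow',
--     'cornsilk': 'yellow',
--     'goldenrod': 'yellow',
--     'darkgoldenrod': 'yellow',
--     'oldlace': 'yellow',
--     'aquamarine': 'green',
--     'mediumaquamarine': 'green',
--     'mediumspringgreen': 'green',
--     'springgreen': 'green',
--     'mediumseagreen': 'green',
--     'lime': 'green',
--     'green': 'green',
--     'darkgreen': 'green',
--     'limegreen': 'green',
--     'forestgreen': 'green',
--     'lightgreen': 'green',
--     'palegreen': 'green',
--     'darkseagreen': 'green',
--     'lawngreen': 'green',
--     'chartreuse': 'green',
--     'greenyellow': 'green',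
--     'darkolivegreen': 'green',
--     'yellowgreen': 'green',
--     'olivedrab': 'green',
--     'blue': 'blue',
--     'mediumblue': 'blue',
--     'darkblue': 'blue',
--     'navy': 'blue',
--     'midnightblue': 'blue',
--     'lavender': 'blue',
--     'royalblue': 'blue',
--     'cornflowerblue': 'blue',
--     'lightsteelblue': 'blue',
--     'slategrey': 'blue',
--     'slategray': 'blue',
--     'lightslategray': 'blue',
--     'lightslategrey': 'blue',
--     'dodgerblue': 'blue',
--     'steelblue': 'blue',
--     'lightskyblue': 'blue',
--     'skyblue': 'blue',
--     'deepskyblue': 'blue',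
--     'lightblue': 'blue',
--     'powderblue': 'blue',
--     'cadetblue': 'blue',
--     'darkturquoise': 'blue',
--     'cyan': 'blue',
--     'aqua': 'blue',
--     'darkcyan': 'blue',
--     'teal': 'blue',
--     'darkslategray': 'blue',
--     'darkslategrey': 'blue',
--     'paleturquoise': 'blue',
--     'lightcyan': 'blue',
--     'mediumturquoise': 'blue',
--     'lightseagreen': 'blue',
--     'turquoise': 'blue',
--     'darkmagenta': 'violet',
--     'purple': 'violet',
--     'violet': 'violet',
--     'plum': 'violet',
--     'thistle': 'violet',
--     'mediumorchid': 'violet',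
--     'darkviolet': 'violet',
--     'darkorchid': 'violet',
--     'indigo': 'violet',
--     'blueviolet': 'violet',
--     'rebeccapurple': 'violet',
--     'mediumpurple': 'violet',
--     'mediumslateblue': 'violet',
--     'darkslateblue': 'violet',
--     'slateblue': 'violet',
--     'fuchsia': 'pink',
--     'magenta': 'pink',
--     'orchid': 'pink',
--     'mediumvioletred': 'pink',
--     'deeppink': 'pink',
--     'hotpink': 'pink',
--     'palevioletred': 'pink',
--     'crimson': 'pink',
--     'pink': 'pink',
--     'lightpink': 'pink',
--     'black': 'black',
-- }
--
-- def identify_parent_color(cname):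
--     return _PARENT.get(cname.lower(), "Undefined")
-- ===== Notes on version B (the rewrite author's own statement) =====
-- stated objective: idiomatic
-- what changed: Replaces A's runtime scan over the nested category dict (list membership test per category) by a module-level flat color->parent dict precomputed with first-category-wins for duplicate color names, so the body is a single dict.get lookup.
import Mathlib
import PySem

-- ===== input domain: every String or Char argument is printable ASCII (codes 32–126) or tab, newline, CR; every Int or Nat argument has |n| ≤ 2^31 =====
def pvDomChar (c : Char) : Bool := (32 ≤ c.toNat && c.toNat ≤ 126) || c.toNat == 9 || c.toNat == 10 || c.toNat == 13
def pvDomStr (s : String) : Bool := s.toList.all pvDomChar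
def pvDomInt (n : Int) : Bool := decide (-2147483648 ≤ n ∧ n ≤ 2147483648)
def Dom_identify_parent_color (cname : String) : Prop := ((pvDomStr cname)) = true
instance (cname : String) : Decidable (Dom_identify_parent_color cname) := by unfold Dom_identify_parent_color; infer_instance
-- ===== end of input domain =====

-- B replaces A's runtime scan over the nested category table by a single lookup in a
-- precomputed flat color -> parent dict (first category wins, hoisted to module level);
-- objective: idiomatic.

-- ===== PORT A =====
-- A's dict literal of categories, in insertion order.
def colorTable : List (String × List String) :=
[
  ("white", ["white", "snow", "seashell", "antiquewhite", "floralwhite", "ivory", "honeydew", "mintcream", "azure", "aliceblue", "ghostwhite", "lavenderblush"]),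
  ("gray", ["dimgray", "dimgrey", "gray", "grey", "darkgray", "darkgrey", "silver", "lightgray", "lightgrey", "gainsboro", "whitesmoke"]),
  ("red", ["orangered", "coral", "darksalmon", "tomato", "salmon", "mistyrose", "red", "darkred", "maroon", "firebrick", "indianred", "lightcoral"]),
  ("brown", ["linen", "peru", "peachpuff", "sandybrown", "saddlebrown", "chocolate", "sienna", "brown", "tan", "burlywood", "bisque"]),
  ("orange", ["moccasin", "papayawhip", "blanchedalmond", "navajowhite", "darkorange"]),
  ("yellow", ["lightgoldenrodyellow", "lightyellow", "beige", "ivory", "darkkhaki", "palegoldenrod", "khaki", "lemonchiffon", "gold", "cornsilk", "goldenrod", "darkgoldenrod", "floralwhite", "oldlace"]),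
  ("green", ["aquamarine", "mediumaquamarine", "mediumspringgreen", "mintcream", "springgreen", "mediumseagreen", "lime", "green", "darkgreen", "limegreen", "forestgreen", "lightgreen", "palegreen", "darkseagreen", "honeydew", "lawngreen", "chartreuse", "greenyellow", "darkolivegreen", "yellowgreen", "olivedrab"]),
  ("blue", ["blue", "mediumblue", "darkblue", "navy", "midnightblue", "lavender", "ghostwhite", "royalblue", "cornflowerblue", "lightsteelblue", "slategrey", "slategray", "lightslategray", "lightslategrey", "dodgerblue", "aliceblue", "steelblue", "lightskyblue", "skyblue", "deepskyblue", "lightblue", "powderblue", "cadetblue", "darkturquoise", "cyan", "aqua", "darkcyan", "teal", "darkslategray", "darkslategrey", "paleturquoise", "lightcyan", "azure", "mediumturquoise", "lightseagreen", "turquoise"]),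
  ("violet", ["darkmagenta", "purple", "violet", "plum", "thistle", "mediumorchid", "darkviolet", "darkorchid", "indigo", "blueviolet", "rebeccapurple", "mediumpurple", "mediumslateblue", "darkslateblue", "slateblue"]),
  ("pink", ["fuchsia", "magenta", "orchid", "mediumvioletred", "deeppink", "hotpink", "lavenderblush", "palevioletred", "crimson", "pink", "lightpink"]),
  ("black", ["black"])
]

-- A's for-loop over the dict items: return the first parent whose list contains cname.
def findParentA (c : String) : List (String × List String) → String
  | [] => "Undefined"
  | (parent, colors) :: rest => if c ∈ colors then parent else findParentA c rest

def identify_parent_color (cname : String) : String :=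
  findParentA (PySem.Str.lower cname) colorTable

-- ===== PORT B =====
-- B's module-level flat dict literal _PARENT (distinct keys, insertion order).
def flatPairs : List (String × String) :=
[
  ("white", "white"),
  ("snow", "white"),
  ("seashell", "white"),
  ("antiquewhite", "white"),
  ("floralwhite", "white"),
  ("ivory", "white"),
  ("honeydew", "white"),
  ("mintcream", "white"),
  ("azure", "white"),
  ("aliceblue", "white"),
  ("ghostwhite", "white"),
  ("lavenderblush", "white"),
  ("dimgray", "gray"),
  ("dimgrey", "gray"),
  ("gray", "gray"),
  ("grey", "gray"),
  ("darkgray", "gray"),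
  ("darkgrey", "gray"),
  ("silver", "gray"),
  ("lightgray", "gray"),
  ("lightgrey", "gray"),
  ("gainsboro", "gray"),
  ("whitesmoke", "gray"),
  ("orangered", "red"),
  ("coral", "red"),
  ("darksalmon", "red"),
  ("tomato", "red"),
  ("salmon", "red"),
  ("mistyrose", "red"),
  ("red", "red"),
  ("darkred", "red"),
  ("maroon", "red"),
  ("firebrick", "red"),
  ("indianred", "red"),
  ("lightcoral", "red"),
  ("linen", "brown"),
  ("peru", "brown"),
  ("peachpuff", "brown"),
  ("sandybrown", "brown"),
  ("saddlebrown", "brown"),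
  ("chocolate", "brown"),
  ("sienna", "brown"),
  ("brown", "brown"),
  ("tan", "brown"),
  ("burlywood", "brown"),
  ("bisque", "brown"),
  ("moccasin", "orange"),
  ("papayawhip", "orange"),
  ("blanchedalmond", "orange"),
  ("navajowhite", "orange"),
  ("darkorange", "orange"),
  ("lightgoldenrodyellow", "yellow"),
  ("lightyellow", "yellow"),
  ("beige", "yellow"),
  ("darkkhaki", "yellow"),
  ("palegoldenrod", "yellow"),
  ("khaki", "yellow"),
  ("lemonchiffon", "yellow"),
  ("gold", "yellow"),
  ("cornsilk", "yellow"),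
  ("goldenrod", "yellow"),
  ("darkgoldenrod", "yellow"),
  ("oldlace", "yellow"),
  ("aquamarine", "green"),
  ("mediumaquamarine", "green"),
  ("mediumspringgreen", "green"),
  ("springgreen", "green"),
  ("mediumseagreen", "green"),
  ("lime", "green"),
  ("green", "green"),
  ("darkgreen", "green"),
  ("limegreen", "green"),
  ("forestgreen", "green"),
  ("lightgreen", "green"),
  ("palegreen", "green"),
  ("darkseagreen", "green"),
  ("lawngreen", "green"),
  ("chartreuse", "green"),
  ("greenyellow", "green"),
  ("darkolivegreen", "green"),
  ("yellowgreen", "green"),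
  ("olivedrab", "green"),
  ("blue", "blue"),
  ("mediumblue", "blue"),
  ("darkblue", "blue"),
  ("navy", "blue"),
  ("midnightblue", "blue"),
  ("lavender", "blue"),
  ("royalblue", "blue"),
  ("cornflowerblue", "blue"),
  ("lightsteelblue", "blue"),
  ("slategrey", "blue"),
  ("slategray", "blue"),
  ("lightslategray", "blue"),
  ("lightslategrey", "blue"),
  ("dodgerblue", "blue"),
  ("steelblue", "blue"),
  ("lightskyblue", "blue"),
  ("skyblue", "blue"),
  ("deepskyblue", "blue"),
  ("lightblue", "blue"),
  ("powderblue", "blue"),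
  ("cadetblue", "blue"),
  ("darkturquoise", "blue"),
  ("cyan", "blue"),
  ("aqua", "blue"),
  ("darkcyan", "blue"),
  ("teal", "blue"),
  ("darkslategray", "blue"),
  ("darkslategrey", "blue"),
  ("paleturquoise", "blue"),
  ("lightcyan", "blue"),
  ("mediumturquoise", "blue"),
  ("lightseagreen", "blue"),
  ("turquoise", "blue"),
  ("darkmagenta", "violet"),
  ("purple", "violet"),
  ("violet", "violet"),
  ("plum", "violet"),
  ("thistle", "violet"),
  ("mediumorchid", "violet"),
  ("darkviolet", "violet"),
  ("darkorchid", "violet"),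
  ("indigo", "violet"),
  ("blueviolet", "violet"),
  ("rebeccapurple", "violet"),
  ("mediumpurple", "violet"),
  ("mediumslateblue", "violet"),
  ("darkslateblue", "violet"),
  ("slateblue", "violet"),
  ("fuchsia", "pink"),
  ("magenta", "pink"),
  ("orchid", "pink"),
  ("mediumvioletred", "pink"),
  ("deeppink", "pink"),
  ("hotpink", "pink"),
  ("palevioletred", "pink"),
  ("crimson", "pink"),
  ("pink", "pink"),
  ("lightpink", "pink"),
  ("black", "black")
]

def reverseTable : PySem.Dict String String := PySem.Dict.ofList flatPairs

-- B's body: _PARENT.get(cname.lower(), "Undefined")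
def identify_parent_color_alt (cname : String) : String :=
  reverseTable.getD (PySem.Str.lower cname) "Undefined"

-- ===== PRECONDITION & SPEC =====
def Spec_identify_parent_color (cname : String) (out : String) : Prop := out = identify_parent_color_alt cname
instance (cname : String) (out : String) : Decidable (Spec_identify_parent_color cname out) := by unfold Spec_identify_parent_color; infer_instance

-- ===== CLAIM (what is proved, stated in full; the proofs are below) =====
def Claim_equal_identify_parent_color : Prop := ∀ (cname : String), Dom_identify_parent_color cname → Spec_identify_parent_color cname (identify_parent_color cname)

-- ===== LEMMAS AND PROOFS =====
-- Optional-valued version of A's search, to state the loop invariant.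
def findParentA? (c : String) : List (String × List String) → Option String
  | [] => none
  | (parent, colors) :: rest => if c ∈ colors then some parent else findParentA? c rest

theorem findParentA_eq_getD (c : String) (t : List (String × List String)) :
    findParentA c t = (findParentA? c t).getD "Undefined" := by
  induction t with
  | nil => rfl
  | cons pc rest ih =>
    obtain ⟨p, cl⟩ := pc
    simp only [findParentA, findParentA?]
    split <;> simp [ih]

-- Flattening of the nested table into (color, parent) pairs, duplicates kept.
def flattenT : List (String × List String) → List (String × String)
  | [] => []
  | (parent, colors) :: rest => colors.map (fun c => (c, parent)) ++ flattenT rest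

-- First-occurrence dedup of an association list by key.
def dedupAux (seen : List String) : List (String × String) → List (String × String)
  | [] => []
  | (k, v) :: rest => if k ∈ seen then dedupAux seen rest else (k, v) :: dedupAux (k :: seen) rest

theorem get?_mk_append (c : String) (l1 l2 : List (String × String)) :
    (PySem.Dict.mk (l1 ++ l2)).get? c
      = ((PySem.Dict.mk l1).get? c).orElse (fun _ => (PySem.Dict.mk l2).get? c) := by
  induction l1 with
  | nil => simp [PySem.Dict.get?, Option.orElse]
  | cons p rest ih =>
    obtain ⟨k, v⟩ := p
    simp only [List.cons_append, PySem.Dict.get?_mk_cons, ih]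
    split <;> simp [Option.orElse]

theorem get?_mk_map_pair (c p : String) (cl : List String) :
    (PySem.Dict.mk (cl.map (fun x => (x, p)))).get? c
      = if c ∈ cl then some p else none := by
  induction cl with
  | nil => simp [PySem.Dict.get?]
  | cons x xs ih =>
    simp only [List.map_cons, PySem.Dict.get?_mk_cons, ih, List.mem_cons]
    by_cases hx : c = x
    · simp [hx]
    · simp [hx, Ne.symm hx]

-- First-match lookup in the flattened pairs IS A's first-category search.
theorem get?_mk_flatten (c : String) (t : List (String × List String)) :
    (PySem.Dict.mk (flattenT t)).get? c = findParentA? c t := by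
  induction t with
  | nil => simp [flattenT, findParentA?, PySem.Dict.get?]
  | cons pc rest ih =>
    obtain ⟨p, cl⟩ := pc
    simp only [flattenT, findParentA?, get?_mk_append, get?_mk_map_pair, ih]
    split <;> simp [Option.orElse]

-- First-occurrence dedup never changes a first-match lookup (for keys not yet seen).
theorem get?_mk_dedupAux (c : String) (l : List (String × String)) :
    ∀ seen : List String,
      (PySem.Dict.mk (dedupAux seen l)).get? c
        = if c ∈ seen then none else (PySem.Dict.mk l).get? c := by
  induction l with
  | nil => intro seen; split <;> simp [dedupAux, PySem.Dict.get?]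
  | cons p rest ih =>
    intro seen
    obtain ⟨k, v⟩ := p
    simp only [dedupAux]
    by_cases hk : k ∈ seen
    · rw [if_pos hk, ih seen]
      by_cases hc : c ∈ seen
      · simp [hc]
      · have hkc : ¬ (k == c) = true := by
          simp only [beq_iff_eq]; rintro rfl; exact hc hk
        simp [hc, PySem.Dict.get?_mk_cons, hkc]
    · rw [if_neg hk]
      rw [PySem.Dict.get?_mk_cons, PySem.Dict.get?_mk_cons, ih (k :: seen)]
      by_cases hkc : k = c
      · subst hkc
        by_cases hc : k ∈ seen
        · exact absurd hc hk
        · simp [hc]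
      · have hb : ¬ (k == c) = true := by simp [beq_iff_eq, hkc]
        simp [hb, List.mem_cons, Ne.symm hkc]

-- The hoisted flat table of B is exactly the first-occurrence dedup of A's flattened table.
set_option maxRecDepth 4096 in
theorem dedup_flatten_eq : dedupAux [] (flattenT colorTable) = flatPairs := by decide

set_option maxRecDepth 4096 in
theorem reverseTable_eq_mk : reverseTable = PySem.Dict.mk flatPairs := by decide

-- ===== VERDICT (by name: the statement is the Claim_ definition above) =====
theorem identify_parent_color_spec : Claim_equal_identify_parent_color := by
  intro cname _
  unfold Spec_identify_parent_color identify_parent_color identify_parent_color_alt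
  rw [reverseTable_eq_mk, PySem.Dict.getD_eq_get?_getD, ← dedup_flatten_eq,
      get?_mk_dedupAux, findParentA_eq_getD]
  simp [get?_mk_flatten]
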